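-- pv_equiv track=rewrite | github.com/Hemant-Chowdhury/tambola | algorithm/algorithm.py | evaluate_list
-- ===== SOURCE A (Python) =====
-- from typing import List
--
-- def evaluate_list(binary_list: List[int]):
--     initial_val = 5
--     count = 0
--     for num in binary_list:
--         if num:
--             count += 1
--             if count >= 3:
--                 initial_val -= 1
--         else:
--             count = 0
--     return initial_val
-- ===== SOURCE B (Python) =====
-- def evaluate_list(binary_list):
--     # Decompose the list into maximal runs of equal truthiness; each truthy
--     # run of length L costs max(0, L - 2); result is 5 minus the total cost.
--     total = 0
--     i = 0
--     n = len(binary_list)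
--     while i < n:
--         j = i
--         while j < n and bool(binary_list[j]) == bool(binary_list[i]):
--             j += 1
--         if binary_list[i]:
--             total += max(0, (j - i) - 2)
--         i = j
--     return 5 - total
-- ===== Notes on version B (the rewrite author's own statement) =====
-- stated objective: alternative
-- what changed: B first splits the list into maximal runs of equal truthiness (two-pointer scan) and sums max(0, L-2) over truthy runs, instead of A's inline counter that decrements per element once the counter reaches 3.
import Mathlib
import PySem

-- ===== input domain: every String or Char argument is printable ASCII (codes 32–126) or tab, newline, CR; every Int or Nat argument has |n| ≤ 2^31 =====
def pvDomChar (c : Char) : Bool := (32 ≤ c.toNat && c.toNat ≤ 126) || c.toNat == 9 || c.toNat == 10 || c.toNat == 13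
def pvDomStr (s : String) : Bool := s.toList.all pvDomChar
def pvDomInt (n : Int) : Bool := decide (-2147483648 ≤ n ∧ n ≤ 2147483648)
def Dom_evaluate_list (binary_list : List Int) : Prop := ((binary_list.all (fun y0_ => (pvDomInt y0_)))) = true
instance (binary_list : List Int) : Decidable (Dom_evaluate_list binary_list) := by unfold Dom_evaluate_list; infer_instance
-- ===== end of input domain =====

-- B decomposes the input into maximal runs of equal truthiness and sums max(0, L-2)
-- over truthy runs; A keeps an inline counter.  Equal on all inputs (objective: alternative).

-- ===== PORT A =====
-- one loop iteration of A: state = (initial_val, count)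
def aStep (s : Int × Int) (num : Int) : Int × Int :=
  if num ≠ 0 then
    (if s.2 + 1 ≥ 3 then s.1 - 1 else s.1, s.2 + 1)
  else
    (s.1, 0)

def evaluate_list (binary_list : List Int) : Int :=
  (binary_list.foldl aStep (5, 0)).1

-- ===== PORT B =====
-- total cost: peel one maximal run of equal truthiness at a time (Source B's outer while loop)
def altTotal : List Int → Int
  | [] => 0
  | x :: xs =>
    (if x ≠ 0 then
        max 0 ((1 + ((xs.takeWhile (fun y => decide (y ≠ 0) == decide (x ≠ 0))).length : Int)) - 2)
      else 0)
    + altTotal (xs.dropWhile (fun y => decide (y ≠ 0) == decide (x ≠ 0)))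
termination_by l => l.length
decreasing_by
  have := List.length_dropWhile_le (fun y => decide (y ≠ 0) == decide (x ≠ 0)) xs
  simp only [List.length_cons]
  omega

def evaluate_list_alt (binary_list : List Int) : Int :=
  5 - altTotal binary_list

-- ===== PRECONDITION & SPEC =====
def Spec_evaluate_list (binary_list : List Int) (out : Int) : Prop := out = evaluate_list_alt binary_list
instance (binary_list : List Int) (out : Int) : Decidable (Spec_evaluate_list binary_list out) := by unfold Spec_evaluate_list; infer_instance

-- ===== CLAIM (what is proved, stated in full; the proofs are below) =====
def Claim_equal_evaluate_list : Prop := ∀ (binary_list : List Int), Dom_evaluate_list binary_list → Spec_evaluate_list binary_list (evaluate_list binary_list)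

-- ===== LEMMAS AND PROOFS =====

-- number of decrements A performs along a run of n truthy elements starting with count c
def dcnt (c : Int) : Nat → Int
  | 0 => 0
  | n + 1 => (if c + 1 ≥ 3 then 1 else 0) + dcnt (c + 1) n

theorem dcnt_ge_two (n : Nat) : ∀ c : Int, 2 ≤ c → dcnt c n = n := by
  induction n with
  | zero => intro c _; simp [dcnt]
  | succ n ih =>
    intro c hc
    have := ih (c + 1) (by omega)
    simp [dcnt, this]
    omega

theorem dcnt_one (n : Nat) : dcnt 1 n = max 0 ((n : Int) - 1) := by
  cases n with
  | zero => simp [dcnt]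
  | succ n =>
    have := dcnt_ge_two n 2 (by omega)
    simp [dcnt, this]

theorem foldl_run (r : List Int) : ∀ (rest : List Int) (iv c : Int),
    (∀ y ∈ r, y ≠ 0) →
    List.foldl aStep (iv, c) (r ++ rest)
      = List.foldl aStep (iv - dcnt c r.length, c + r.length) rest := by
  induction r with
  | nil => intro rest iv c _; simp [dcnt]
  | cons y r ih =>
    intro rest iv c h
    have hy : y ≠ 0 := h y (by simp)
    have hr : ∀ z ∈ r, z ≠ 0 := fun z hz => h z (by simp [hz])
    simp only [List.cons_append, List.foldl_cons, aStep, if_pos hy]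
    rw [ih rest _ (c + 1) hr]
    have h1 : ((if c + 1 ≥ 3 then iv - 1 else iv) : Int) - dcnt (c + 1) r.length
        = iv - dcnt c (y :: r).length := by
      simp [dcnt]
      split_ifs <;> omega
    have h2 : (c + 1 + (r.length : Int)) = c + ((y :: r).length : Int) := by
      simp; omega
    rw [h1, h2]

theorem foldl_zeros (r : List Int) : ∀ (rest : List Int) (iv : Int),
    (∀ y ∈ r, y = 0) →
    List.foldl aStep (iv, 0) (r ++ rest) = List.foldl aStep (iv, 0) rest := by
  induction r with
  | nil => intro rest iv _; simp
  | cons y r ih =>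
    intro rest iv h
    have hy : y = 0 := h y (by simp)
    have hstep : aStep (iv, 0) y = (iv, 0) := by simp [aStep, hy]
    rw [List.cons_append, List.foldl_cons, hstep]
    exact ih rest iv (fun z hz => h z (by simp [hz]))

theorem dropWhile_head_false {α : Type} (p : α → Bool) :
    ∀ (l : List α) z rest, l.dropWhile p = z :: rest → p z = false := by
  intro l
  induction l with
  | nil => intro z rest h; simp [List.dropWhile] at h
  | cons a l ih =>
    intro z rest h
    by_cases hp : p a = true
    · rw [List.dropWhile_cons_of_pos hp] at h; exact ih z rest h
    · rw [List.dropWhile_cons_of_neg hp] at h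
      cases h; simpa using hp

theorem altTotal_nil : altTotal [] = 0 := by
  conv_lhs => unfold altTotal

theorem altTotal_cons (x : Int) (xs : List Int) :
    altTotal (x :: xs)
      = (if x ≠ 0 then
            max 0 ((1 + ((xs.takeWhile (fun y => decide (y ≠ 0) == decide (x ≠ 0))).length : Int)) - 2)
          else 0)
        + altTotal (xs.dropWhile (fun y => decide (y ≠ 0) == decide (x ≠ 0))) := by
  conv_lhs => unfold altTotal

theorem main_inv : ∀ (n : Nat) (l : List Int), l.length ≤ n → ∀ iv : Int,
    (List.foldl aStep (iv, 0) l).1 = iv - altTotal l := by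
  intro n
  induction n with
  | zero =>
    intro l hl iv
    have : l = [] := List.eq_nil_of_length_eq_zero (by omega)
    subst this; simp [altTotal_nil]
  | succ n ih =>
    intro l hl iv
    match l with
    | [] => simp [altTotal_nil]
    | x :: xs =>
      have hlen : xs.length ≤ n := by simpa using hl
      set p := fun y : Int => decide (y ≠ 0) == decide (x ≠ 0) with hp
      have hsplit : xs.takeWhile p ++ xs.dropWhile p = xs := List.takeWhile_append_dropWhile
      have hdrop_le : (xs.dropWhile p).length ≤ xs.length := List.length_dropWhile_le p xs
      by_cases hx : x = 0
      · -- falsy run: all of x :: takeWhile are zero, A's state is unchanged through it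
        have hz : ∀ y ∈ x :: xs.takeWhile p, y = 0 := by
          intro y hy
          rcases List.mem_cons.mp hy with h | h
          · simpa [h] using hx
          · have := List.mem_takeWhile_imp h
            simp [hp, hx] at this
            exact this
        have h2 := foldl_zeros (x :: xs.takeWhile p) (xs.dropWhile p) iv hz
        rw [List.cons_append, hsplit] at h2
        rw [h2, ih _ (by omega) iv, altTotal_cons]
        simp [hx, hp]
      · -- truthy run
        have ht : ∀ y ∈ xs.takeWhile p, y ≠ 0 := by
          intro y hy
          have := List.mem_takeWhile_imp hy
          simp [hp, hx] at this
          exact this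
        have h1 : List.foldl aStep (iv, 0) (x :: xs) = List.foldl aStep (iv, 1) xs := by
          simp [aStep, hx]
        have h2 := foldl_run (xs.takeWhile p) (xs.dropWhile p) iv 1 ht
        rw [hsplit] at h2
        rw [h1, h2, dcnt_one, altTotal_cons]
        simp only [← hp, if_pos hx]
        set m := (xs.takeWhile p).length with hm
        rcases hrest : xs.dropWhile p with _ | ⟨z, rest'⟩
        · simp [altTotal_nil]
          omega
        · have hz0 : z = 0 := by
            have := dropWhile_head_false p xs z rest' hrest
            simp [hp] at this
            tauto
          have hlen' : (z :: rest').length ≤ n := by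
            have : (z :: rest').length ≤ xs.length := by rw [← hrest]; exact hdrop_le
            omega
          have e1 : List.foldl aStep (iv - max 0 ((m : Int) - 1), 1 + (m : Int)) (z :: rest')
              = List.foldl aStep (iv - max 0 ((m : Int) - 1), 0) rest' := by
            simp [aStep, hz0]
          have e2 : List.foldl aStep (iv - max 0 ((m : Int) - 1), 0) (z :: rest')
              = List.foldl aStep (iv - max 0 ((m : Int) - 1), 0) rest' := by
            simp [aStep, hz0]
          rw [e1, ← e2, ih _ hlen' _]
          omega

-- ===== VERDICT (by name: the statement is the Claim_ definition above) =====
theorem evaluate_list_spec : Claim_equal_evaluate_list := by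
  intro l _
  unfold Spec_evaluate_list evaluate_list evaluate_list_alt
  have := main_inv l.length l (le_refl _) 5
  omega
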